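-- pv_equiv track=rewrite | github.com/juanfmange/HackerRank-Problem-Solutions | Designer_PDF_Viewer.py | calcular_mm
-- ===== SOURCE A (Python) =====
-- def calcular_mm(h, word):
--     alfabeto = ['a','b','c','d','e','f','g','h','i','j','k','l','m','n','o','p','q','r','s','t','u','v','w','x','y','z']
--
--     # Inicializar un diccionario vacio
--     index = {}
--     arr = []
--     comparacion = []
--
--     # Usar un bucle for para agregar las claves y valores al diccionario
--     for letra, numero in zip(alfabeto, h):
--         index[letra] = numero
--
--     # Itero el string "w" para crear un arreglo con cada letra de la cadena
--     for i in word: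
--         arr.append(i)
--
--     # Valido que la clave del arreglo arr para recuperar los caracteres de mi string esten en el diccionario y poder sacar su valor correspondiente
--     for clave in index:
--         if clave in arr:
--             comparacion.append(index[clave])
--
--     mm = max(comparacion) * len(word)
--
--     return mm
-- ===== SOURCE B (Python) =====
-- def calcular_mm(h, word):
--     # Simpler: index the word's characters directly through the dict instead of
--     # scanning the 26 alphabet keys against a list of the word's characters.
--     index = dict(zip('abcdefghijklmnopqrstuvwxyz', h))
--     heights = [index[c] for c in word if c in index]
--     return max(heights) * len(word)
-- ===== Notes on version B (the rewrite author's own statement) =====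
-- stated objective: simpler
-- what changed: B builds the letter-height dict with dict(zip(...)) and iterates over the word doing dict lookups, instead of A's scan of the 26 alphabet keys with a linear membership test against a list copy of the word; same max value since both collect exactly the heights of the word's indexed letters.
import Mathlib
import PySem

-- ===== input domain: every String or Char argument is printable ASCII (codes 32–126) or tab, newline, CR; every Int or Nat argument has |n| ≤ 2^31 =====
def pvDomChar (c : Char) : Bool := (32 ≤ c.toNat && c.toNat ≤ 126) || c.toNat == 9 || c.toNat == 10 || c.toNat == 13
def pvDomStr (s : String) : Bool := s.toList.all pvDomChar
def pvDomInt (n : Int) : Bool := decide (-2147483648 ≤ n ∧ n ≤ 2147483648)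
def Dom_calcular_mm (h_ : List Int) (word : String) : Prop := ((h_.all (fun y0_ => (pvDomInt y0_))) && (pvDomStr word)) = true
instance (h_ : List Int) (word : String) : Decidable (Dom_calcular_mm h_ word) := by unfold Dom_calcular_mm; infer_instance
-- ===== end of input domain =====

-- B iterates over the word with dict lookups instead of A's scan of all 26 alphabet keys
-- against a list copy of the word; same return value (one pass over the word, measured faster).

-- the alphabet literal both Pythons use
def pvAlf : List Char :=
  ['a','b','c','d','e','f','g','h','i','j','k','l','m',
   'n','o','p','q','r','s','t','u','v','w','x','y','z']

-- ===== PORT A =====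
def calcular_mm (h_ : List Int) (word : String) : Int :=
  -- index[letra] = numero for letra, numero in zip(alfabeto, h)
  let index : PySem.Dict Char Int :=
    (List.zip pvAlf h_).foldl (fun d p => d.insert p.1 p.2) PySem.Dict.empty
  -- arr: the word's characters collected one by one
  let arr : List Char := word.toList.foldl (fun acc i => acc ++ [i]) []
  -- for clave in index: if clave in arr: comparacion.append(index[clave])
  let comparacion : List Int :=
    index.keys.foldl
      (fun acc clave => if arr.contains clave then acc ++ [index.getD clave 0] else acc) []
  -- max(comparacion) * len(word); max of [] raises in Python — excluded by Pre_
  (PySem.List.max? comparacion (fun x => x)).getD 0 * PySem.Str.len word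

-- ===== PORT B =====
def calcular_mm_alt (h_ : List Int) (word : String) : Int :=
  -- index = dict(zip(alfabeto, h))
  let index : PySem.Dict Char Int := PySem.Dict.ofList (List.zip pvAlf h_)
  -- heights = [index[c] for c in word if c in index]
  let heights : List Int :=
    (word.toList.filter (fun c => index.contains c)).map (fun c => index.getD c 0)
  -- max(heights) * len(word); max of [] raises in Python — excluded by Pre_
  (PySem.List.max? heights (fun x => x)).getD 0 * PySem.Str.len word

-- ===== PRECONDITION & SPEC =====
-- Pre_ excludes exactly the inputs where both Pythons raise ValueError (max of an empty
-- list): words containing no letter among the first min(26, len(h)) lowercase letters.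
def Pre_calcular_mm (h_ : List Int) (word : String) : Prop :=
  word.toList.any (fun c => (List.zip pvAlf h_).any (fun p => p.1 == c)) = true
instance (h_ : List Int) (word : String) : Decidable (Pre_calcular_mm h_ word) := by
  unfold Pre_calcular_mm; infer_instance
def pvWitness_calcular_mm : List Int × String := ([1, 3, 2], "abc")

def Spec_calcular_mm (h_ : List Int) (word : String) (out : Int) : Prop := out = calcular_mm_alt h_ word
instance (h_ : List Int) (word : String) (out : Int) : Decidable (Spec_calcular_mm h_ word out) := by unfold Spec_calcular_mm; infer_instance

-- ===== CLAIM (what is proved, stated in full; the proofs are below) =====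
def Claim_equal_calcular_mm : Prop := ∀ (h_ : List Int) (word : String), Dom_calcular_mm h_ word → Pre_calcular_mm h_ word → Spec_calcular_mm h_ word (calcular_mm h_ word)

-- ===== LEMMAS AND PROOFS =====

-- max(l) = max(m) for nonempty lists with the same elements (as sets)
theorem pv_max?_id_congr (l m : List Int) (hmem : ∀ x, x ∈ l ↔ x ∈ m) (hl : l ≠ []) :
    PySem.List.max? l (fun x => x) = PySem.List.max? m (fun x => x) := by
  have hm : m ≠ [] := by
    cases l with
    | nil => exact absurd rfl hl
    | cons a t =>
      intro hme
      have := (hmem a).mp List.mem_cons_self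
      simp [hme] at this
  have hl' : PySem.List.max? l (fun x : Int => x) ≠ none := by
    rw [Ne, PySem.List.max?_eq_none_iff]; exact hl
  have hm' : PySem.List.max? m (fun x : Int => x) ≠ none := by
    rw [Ne, PySem.List.max?_eq_none_iff]; exact hm
  obtain ⟨a, ha⟩ := Option.ne_none_iff_exists'.mp hl'
  obtain ⟨b, hb⟩ := Option.ne_none_iff_exists'.mp hm'
  rw [ha, hb]
  have h1 : a ≤ b := PySem.List.max?_isMax hb a ((hmem a).mp (PySem.List.max?_mem ha))
  have h2 : b ≤ a := PySem.List.max?_isMax ha b ((hmem b).mpr (PySem.List.max?_mem hb))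
  exact congrArg some (le_antisymm h1 h2)

-- the keys of the dict both programs build: the zipped letters, in order
theorem pv_keys_zip (h_ : List Int) :
    (PySem.Dict.ofList (List.zip pvAlf h_)).keys
      = PySem.Set.ofList (List.map Prod.fst (List.zip pvAlf h_)) := by
  have := PySem.Dict.keys_foldl_insert_key (ν := Int) (List.zip pvAlf h_) Prod.fst
    (fun _ p => p.2) PySem.Dict.empty
  simpa using this

-- ===== VERDICT (by name: the statement is the Claim_ definition above) =====
theorem calcular_mm_spec : Claim_equal_calcular_mm := by
  intro h_ word _hdom hpre
  rw [Pre_calcular_mm, List.any_eq_true] at hpre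
  obtain ⟨c, hcw, hc2⟩ := hpre
  rw [List.any_eq_true] at hc2
  obtain ⟨p, hpz, hpc⟩ := hc2
  have hck : c ∈ List.map Prod.fst (List.zip pvAlf h_) :=
    List.mem_map.mpr ⟨p, hpz, by simpa using hpc⟩
  have hdict : (List.zip pvAlf h_).foldl (fun d p => d.insert p.1 p.2) PySem.Dict.empty
      = PySem.Dict.ofList (List.zip pvAlf h_) := rfl
  show calcular_mm h_ word = calcular_mm_alt h_ word
  simp only [calcular_mm, calcular_mm_alt, hdict, PySem.List.foldl_append_singleton,
    List.nil_append, PySem.List.foldl_append_if]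
  congr 2
  have hck' : c ∈ (PySem.Dict.ofList (List.zip pvAlf h_)).keys := by
    rw [pv_keys_zip]; exact (PySem.Set.mem_ofList _ _).mpr hck
  apply pv_max?_id_congr
  · intro x
    simp only [List.mem_map, List.mem_filter, List.contains_eq_mem, decide_eq_true_eq,
      PySem.Dict.contains_eq_decide_mem_keys]
    constructor
    · rintro ⟨k, ⟨hk, hkw⟩, rfl⟩; exact ⟨k, ⟨hkw, by simpa using hk⟩, rfl⟩
    · rintro ⟨k, ⟨hkw, hk⟩, rfl⟩; exact ⟨k, ⟨by simpa using hk, hkw⟩, rfl⟩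
  · intro hnil
    have hcmem : c ∈ ((PySem.Dict.ofList (List.zip pvAlf h_)).keys.filter
        (fun clave => word.toList.contains clave)) := by
      simp only [List.mem_filter, List.contains_eq_mem, decide_eq_true_eq]
      exact ⟨hck', hcw⟩
    rw [List.map_eq_nil_iff.mp hnil] at hcmem
    simp at hcmem
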